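-- pv_equiv track=rewrite | github.com/amitt001/pygmy | src/pygmy/model/clickmeta.py | psql_date_format
-- ===== SOURCE A (Python) =====
-- def psql_date_format(date_str):
--     psql_format = date_str
--     date_arg_map = {
--         '%Y': 'YYYY',
--         '%m': 'MM',
--         '%d': 'DD',
--         '%H': 'HH24',
--         '%M': 'MI',
--         '%S': 'SS'
--     }
--     for dt_arg, dt_val in date_arg_map.items():
--         psql_format = psql_format.replace(dt_arg, dt_val)
--     return psql_format
-- ===== SOURCE B (Python) =====
-- _PSQL_MAP = {
--     '%Y': 'YYYY',
--     '%m': 'MM',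
--     '%d': 'DD',
--     '%H': 'HH24',
--     '%M': 'MI',
--     '%S': 'SS'
-- }
--
--
-- def psql_date_format(date_str):
--     out = []
--     i = 0
--     n = len(date_str)
--     while i < n:
--         repl = _PSQL_MAP.get(date_str[i:i + 2])
--         if repl is None:
--             out.append(date_str[i])
--             i += 1
--         else:
--             out.append(repl)
--             i += 2
--     return ''.join(out)
-- ===== Notes on version B (the rewrite author's own statement) =====
-- stated objective: alternative
-- what changed: Replaces the six sequential full-string .replace passes with a single left-to-right scan that looks each two-character window up in the format map once, so replacement output can never be re-matched by a later pass.
-- intended difference: On inputs containing the substring '%%m', A's '%m'->'MM' pass puts 'MM' right after a literal '%', and the later '%M'->'MI' pass consumes that accidental '%M' (e.g. A('%%m') = 'MIM'); B leaves the literal '%' alone and returns '%MM', which is the intended translation of the format codes. — e.g. on psql_date_format("%%m"): A returns "MIM", B returns "%MM"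
import Mathlib
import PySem

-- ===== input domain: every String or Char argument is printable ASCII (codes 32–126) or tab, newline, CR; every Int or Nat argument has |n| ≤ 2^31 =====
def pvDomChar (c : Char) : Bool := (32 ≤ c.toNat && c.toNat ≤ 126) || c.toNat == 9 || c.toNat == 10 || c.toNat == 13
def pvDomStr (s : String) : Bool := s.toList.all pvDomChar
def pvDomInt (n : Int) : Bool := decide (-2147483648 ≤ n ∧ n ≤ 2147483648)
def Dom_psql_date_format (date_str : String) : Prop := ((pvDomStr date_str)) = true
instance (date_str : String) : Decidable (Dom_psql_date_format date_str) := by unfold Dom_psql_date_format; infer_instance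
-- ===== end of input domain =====

-- B replaces A's six sequential full-string .replace passes by one left-to-right scan of the
-- input; on strings containing "%%m" A's later '%M' pass re-matches output of the '%m' pass
-- (A '%%m' = "MIM") while B returns the intended "%MM" — stated below as D_psql_date_format.

-- ===== PORT A =====
def psql_date_format (date_str : String) : String :=
  let psql_format := date_str
  let date_arg_map : PySem.Dict String String :=
    PySem.Dict.mk [("%Y", "YYYY"), ("%m", "MM"), ("%d", "DD"),
                   ("%H", "HH24"), ("%M", "MI"), ("%S", "SS")]
  date_arg_map.items.foldl (fun psql_format p => PySem.Str.replace psql_format p.1 p.2) psql_format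

-- ===== PORT B =====
-- _PSQL_MAP.get(date_str[i:i+2]): the two-character-window lookup of Source B
def pvCode? (a b : Char) : Option (List Char) :=
  if a = '%' then
    if b = 'Y' then some ['Y', 'Y', 'Y', 'Y']
    else if b = 'm' then some ['M', 'M']
    else if b = 'd' then some ['D', 'D']
    else if b = 'H' then some ['H', 'H', '2', '4']
    else if b = 'M' then some ['M', 'I']
    else if b = 'S' then some ['S', 'S']
    else none
  else none

-- the while loop of Source B: advance by 2 on a hit, by 1 otherwise
def pvScan : List Char → List Char
  | [] => []
  | [a] => [a]
  | a :: b :: t =>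
    match pvCode? a b with
    | some v => v ++ pvScan t
    | none => a :: pvScan (b :: t)

def psql_date_format_alt (date_str : String) : String :=
  String.ofList (pvScan date_str.toList)

-- ===== PRECONDITION & SPEC =====
-- On inputs containing the substring "%%m", A's '%m'->'MM' pass puts 'MM' right after a literal
-- '%' and the later '%M'->'MI' pass consumes that accidental '%M' (A '%%m' = "MIM"); B leaves the
-- literal '%' alone and returns "%MM", the intended translation of the format codes.
def D_psql_date_format (date_str : String) : Prop :=
  PySem.Str.isIn "%%m" date_str = true
instance (date_str : String) : Decidable (D_psql_date_format date_str) := by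
  unfold D_psql_date_format; infer_instance

def Spec_psql_date_format (date_str : String) (out : String) : Prop :=
  ¬ D_psql_date_format date_str → out = psql_date_format_alt date_str
instance (date_str : String) (out : String) : Decidable (Spec_psql_date_format date_str out) := by
  unfold Spec_psql_date_format; infer_instance

def pvDiffWitness_psql_date_format : String := "%%m"
def pvDiffWitnessOut_psql_date_format : String × String := ("MIM", "%MM")

-- ===== CLAIM (what is proved, stated in full; the proofs are below) =====
def Claim_unchanged_psql_date_format : Prop :=
  ∀ (date_str : String), Dom_psql_date_format date_str →
    Spec_psql_date_format date_str (psql_date_format date_str)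

def Claim_changed_psql_date_format : Prop :=
  Dom_psql_date_format (pvDiffWitness_psql_date_format) ∧
  D_psql_date_format (pvDiffWitness_psql_date_format) ∧
  psql_date_format (pvDiffWitness_psql_date_format) = pvDiffWitnessOut_psql_date_format.1 ∧
  psql_date_format_alt (pvDiffWitness_psql_date_format) = pvDiffWitnessOut_psql_date_format.2 ∧
  pvDiffWitnessOut_psql_date_format.1 ≠ pvDiffWitnessOut_psql_date_format.2

def Claim_exact_psql_date_format : Prop :=
  ∀ (date_str : String), Dom_psql_date_format date_str → D_psql_date_format date_str →
    psql_date_format date_str ≠ psql_date_format_alt date_str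

-- ===== LEMMAS AND PROOFS =====

-- semantic form of one Python .replace pass with the two-character pattern ['%', c]
def pvRep (c : Char) (v : List Char) : List Char → List Char
  | [] => []
  | [a] => [a]
  | a :: b :: t =>
    if a = '%' ∧ b = c then v ++ pvRep c v t else a :: pvRep c v (b :: t)

-- single left-to-right scan parametrised by a key table (suffix-stable form of pvScan)
def pvScanP (ps : List (Char × List Char)) : List Char → List Char
  | [] => []
  | [a] => [a]
  | a :: b :: t =>
    match (if a = '%' then List.lookup b ps else none) with
    | some v => v ++ pvScanP ps t
    | none => a :: pvScanP ps (b :: t)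

def pvTable : List (Char × List Char) :=
  [('Y', ['Y', 'Y', 'Y', 'Y']), ('m', ['M', 'M']), ('d', ['D', 'D']),
   ('H', ['H', 'H', '2', '4']), ('M', ['M', 'I']), ('S', ['S', 'S'])]

theorem pvRep_go_eq (c : Char) (v : List Char) :
    ∀ (fuel : Nat) (l acc : List Char), l.length ≤ fuel →
      PySem.Chars.replace.go ['%', c] v fuel l acc = acc.reverse ++ pvRep c v l := by
  intro fuel
  induction fuel with
  | zero =>
    intro l acc h
    have : l = [] := List.eq_nil_of_length_eq_zero (Nat.le_zero.mp h)
    subst this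
    simp [PySem.Chars.replace.go, pvRep]
  | succ n ih =>
    intro l acc h
    match l with
    | [] => simp [PySem.Chars.replace.go, pvRep]
    | [a] =>
      have hpre : List.isPrefixOf ['%', c] [a] = false := by
        simp [List.isPrefixOf]
      simp only [PySem.Chars.replace.go, hpre, Bool.false_eq_true, if_false]
      rw [ih [] (a :: acc) (by simp)]
      simp [pvRep]
    | a :: b :: t =>
      by_cases hm : a = '%' ∧ b = c
      · obtain ⟨rfl, rfl⟩ := hm
        have hpre : List.isPrefixOf ['%', b] ('%' :: b :: t) = true := by
          simp [List.isPrefixOf]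
        simp only [PySem.Chars.replace.go, hpre, if_true]
        rw [show List.drop (['%', b].length) ('%' :: b :: t) = t from rfl,
          ih t (v.reverse ++ acc) (by simp at h ⊢; omega)]
        simp [pvRep]
      · have hpre : List.isPrefixOf ['%', c] (a :: b :: t) = false := by
          simp [List.isPrefixOf]
          rintro rfl rfl
          exact hm ⟨rfl, rfl⟩
        simp only [PySem.Chars.replace.go, hpre, Bool.false_eq_true, if_false]
        rw [ih (b :: t) (a :: acc) (by simp at h ⊢; omega)]
        simp [pvRep, hm]

theorem pvRep_eq_replace (c : Char) (v l : List Char) :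
    PySem.Chars.replace l ['%', c] v = pvRep c v l := by
  simp only [PySem.Chars.replace, List.isEmpty_cons, Bool.false_eq_true, if_false]
  simpa using pvRep_go_eq c v l.length l [] (Nat.le_refl _)

theorem pvRep_cons (c : Char) (v : List Char) (a : Char) (x : List Char) (h : a ≠ '%') :
    pvRep c v (a :: x) = a :: pvRep c v x := by
  match x with
  | [] => simp [pvRep]
  | b :: t => simp [pvRep, h]

theorem pvRep_append (c : Char) (v w x : List Char) (h : ∀ ch ∈ w, ch ≠ '%') :
    pvRep c v (w ++ x) = w ++ pvRep c v x := by
  induction w with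
  | nil => simp
  | cons a w ih =>
    have ha : a ≠ '%' := h a (by simp)
    rw [List.cons_append, pvRep_cons c v a _ ha, ih (fun ch hch => h ch (by simp [hch]))]
    simp

theorem pvRep_pct (c : Char) (v x : List Char) (h : ∀ hh tt, x = hh :: tt → hh ≠ c) :
    pvRep c v ('%' :: x) = '%' :: pvRep c v x := by
  match x with
  | [] => simp [pvRep]
  | hh :: tt =>
    simp [pvRep, h hh tt rfl]

theorem pvLookup_none (x : Char) (ps : List (Char × List Char)) (h : ∀ p ∈ ps, p.1 ≠ x) :
    List.lookup x ps = none := by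
  induction ps with
  | nil => rfl
  | cons p ps ih =>
    have h1 : (x == p.1) = false :=
      beq_eq_false_iff_ne.mpr (Ne.symm (h p (List.mem_cons_self)))
    simp only [List.lookup, h1]
    exact ih (fun q hq => h q (List.mem_cons_of_mem _ hq))

theorem pvLookup_mem (x : Char) (w : List Char) (ps : List (Char × List Char))
    (h : List.lookup x ps = some w) : (x, w) ∈ ps := by
  induction ps with
  | nil => simp [List.lookup] at h
  | cons p ps ih =>
    simp only [List.lookup] at h
    by_cases hx : p.1 = x
    · have hb : (x == p.1) = true := beq_iff_eq.mpr hx.symm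
      rw [hb] at h
      simp only [Option.some.injEq] at h
      subst hx
      subst h
      exact List.mem_cons_self
    · have hb : (x == p.1) = false := beq_eq_false_iff_ne.mpr (Ne.symm hx)
      rw [hb] at h
      exact List.mem_cons_of_mem _ (ih h)

theorem pvScanP_nil : ∀ l, pvScanP [] l = l
  | [] => rfl
  | [_] => rfl
  | a :: b :: t => by
    have := pvScanP_nil (b :: t)
    simp only [pvScanP, List.lookup]
    split <;> simp_all

theorem pvScan_eq_scanP : ∀ l, pvScan l = pvScanP pvTable l
  | [] => rfl
  | [_] => rfl
  | a :: b :: t => by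
    have h1 := pvScan_eq_scanP t
    have h2 := pvScan_eq_scanP (b :: t)
    have hcode : pvCode? a b = (if a = '%' then List.lookup b pvTable else none) := by
      by_cases ha : a = '%'
      · simp only [pvCode?, pvTable, ha, if_true]
        by_cases hY : b = 'Y'
        · subst hY; simp [List.lookup]
        · rw [if_neg hY]
          by_cases hm : b = 'm'
          · subst hm; simp [List.lookup]
          · rw [if_neg hm]
            by_cases hd : b = 'd'
            · subst hd; simp [List.lookup]
            · rw [if_neg hd]
              by_cases hH : b = 'H'
              · subst hH; simp [List.lookup]
              · rw [if_neg hH]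
                by_cases hM : b = 'M'
                · subst hM; simp [List.lookup]
                · rw [if_neg hM]
                  by_cases hS : b = 'S'
                  · subst hS; simp [List.lookup]
                  · rw [if_neg hS]
                    rw [pvLookup_none b _ (by
                      intro p hp
                      simp only [List.mem_cons, List.not_mem_nil, or_false] at hp
                      rcases hp with rfl | rfl | rfl | rfl | rfl | rfl <;>
                        simp [Ne.symm hY, Ne.symm hm, Ne.symm hd, Ne.symm hH,
                              Ne.symm hM, Ne.symm hS])]
      · simp [pvCode?, ha]
    simp only [pvScan, pvScanP, hcode]
    split <;> simp_all

-- head of a scan result is never c, unless a "%%<k>" cascade with value head c is present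
theorem pvScanP_head (c : Char) (ps : List (Char × List Char))
    (hvals : ∀ p ∈ ps, p.2 ≠ [] ∧ ∀ ch ∈ p.2, ch ≠ '%')
    (hc : c ≠ '%') (b : Char) (t : List Char) (hbc : b ≠ c)
    (hl : ∀ p ∈ ps, p.2.head? = some c → ¬ ('%' :: '%' :: [p.1]) <:+: ('%' :: b :: t)) :
    ∀ hh tt, pvScanP ps (b :: t) = hh :: tt → hh ≠ c := by
  intro hh tt heq hhc
  subst hhc
  by_cases hb : b = '%'
  · subst hb
    cases t with
    | nil =>
      simp only [pvScanP] at heq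
      injection heq with h1 _
      exact hc h1.symm
    | cons b2 t2 =>
      cases hbk : List.lookup b2 ps with
      | some w =>
        have hmem := pvLookup_mem b2 w ps hbk
        have hw := hvals (b2, w) hmem
        simp only [pvScanP, hbk, reduceIte] at heq
        cases w with
        | nil => exact hw.1 rfl
        | cons wh wt =>
          simp only [List.cons_append] at heq
          injection heq with h1 _
          exact hl (b2, wh :: wt) hmem (by simp [h1]) ⟨[], t2, rfl⟩
      | none =>
        simp only [pvScanP, hbk, reduceIte] at heq
        injection heq with h1 _
        exact hc h1.symm
  · apply hbc
    cases t with
    | nil =>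
      simp only [pvScanP, List.cons.injEq] at heq
      exact heq.1
    | cons b2 t2 =>
      simp only [pvScanP, hb, if_false, List.cons.injEq] at heq
      exact heq.1

-- one .replace pass applied after a scan over table ps is the scan over ps + the new key,
-- provided no "%%<k>" cascade in the input re-matches a replacement value starting with c
theorem pvRep_scanP (c : Char) (v : List Char) (ps : List (Char × List Char))
    (hc : c ≠ '%')
    (hvals : ∀ p ∈ ps, p.2 ≠ [] ∧ ∀ ch ∈ p.2, ch ≠ '%')
    (hcps : ∀ p ∈ ps, p.1 ≠ c) :
    ∀ l, (∀ p ∈ ps, p.2.head? = some c → ¬ ('%' :: '%' :: [p.1]) <:+: l) →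
      pvRep c v (pvScanP ps l) = pvScanP (ps ++ [(c, v)]) l
  | [], _ => rfl
  | [a], _ => rfl
  | a :: b :: t, hl => by
    have hl_tail : ∀ p ∈ ps, p.2.head? = some c → ¬ ('%' :: '%' :: [p.1]) <:+: (b :: t) :=
      fun p hp hh hinf => hl p hp hh (List.infix_cons hinf)
    have hl_t : ∀ p ∈ ps, p.2.head? = some c → ¬ ('%' :: '%' :: [p.1]) <:+: t :=
      fun p hp hh hinf => hl_tail p hp hh (List.infix_cons hinf)
    by_cases ha : a = '%'
    · subst ha
      cases hbk : List.lookup b ps with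
      | some w =>
        -- matched window: value w pushes through the extra pass (no '%' in w)
        have hw := hvals (b, w) (pvLookup_mem b w ps hbk)
        have hlk' : List.lookup b (ps ++ [(c, v)]) = some w := by
          rw [List.lookup_append, hbk]; rfl
        simp only [pvScanP, if_true, hbk, hlk', reduceIte]
        rw [pvRep_append c v w _ hw.2, pvRep_scanP c v ps hc hvals hcps t hl_t]
      | none =>
        by_cases hbc : b = c
        · -- the new key matches this window
          have hlk' : List.lookup b (ps ++ [(c, v)]) = some v := by
            rw [List.lookup_append, hbk]
            simp only [Option.none_or, List.lookup, beq_iff_eq.mpr hbc]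
          cases t with
          | nil =>
            cases hbc
            simp [pvScanP, hbk, hlk', pvRep]
          | cons b2 t2 =>
            have hrec := pvRep_scanP c v ps hc hvals hcps (b2 :: t2)
              (fun p hp hh hinf => hl_t p hp hh hinf)
            have hbp : b ≠ '%' := fun h => hc (hbc.symm.trans h)
            simp only [pvScanP, hbk, hlk', reduceIte, hbp, if_false]
            simp only [pvRep, hbc, and_self, if_true, true_and, reduceIte]
            rw [hrec]
        · -- no match at this window for either side
          have hlk' : List.lookup b (ps ++ [(c, v)]) = none := by
            rw [List.lookup_append, hbk]
            simp only [Option.none_or]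
            simp only [List.lookup, beq_eq_false_iff_ne.mpr hbc]
          have hrec := pvRep_scanP c v ps hc hvals hcps (b :: t) hl_tail
          have hhead := pvScanP_head c ps hvals hc b t hbc hl
          simp only [pvScanP, if_true, hbk, hlk', reduceIte]
          rw [pvRep_pct c v _ hhead, hrec]
    · -- window does not start with '%': both sides copy a
      have hrec := pvRep_scanP c v ps hc hvals hcps (b :: t) hl_tail
      simp only [pvScanP, ha, if_false, reduceIte]
      rw [pvRep_cons c v a _ ha, hrec]
termination_by l _ => l.length
decreasing_by all_goals subst_vars; simp [List.length_cons]

-- the full six-pass cascade equals the single scan, away from "%%m"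
set_option maxRecDepth 8192 in
theorem pvChain_eq_scan (l : List Char) (h : ¬ ('%' :: '%' :: ['m']) <:+: l) :
    pvRep 'S' ['S', 'S'] (pvRep 'M' ['M', 'I'] (pvRep 'H' ['H', 'H', '2', '4']
      (pvRep 'd' ['D', 'D'] (pvRep 'm' ['M', 'M'] (pvRep 'Y' ['Y', 'Y', 'Y', 'Y'] l))))) =
    pvScan l := by
  have e1 := pvRep_scanP 'Y' ['Y', 'Y', 'Y', 'Y'] [] (by decide) (by simp) (by simp) l (by simp)
  have e2 := pvRep_scanP 'm' ['M', 'M'] [('Y', ['Y', 'Y', 'Y', 'Y'])]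
    (by decide) (by intro p hp; fin_cases hp <;> simp)
    (by intro p hp; fin_cases hp <;> simp) l
    (by intro p hp hh; fin_cases hp <;> simp at hh)
  have e3 := pvRep_scanP 'd' ['D', 'D'] [('Y', ['Y', 'Y', 'Y', 'Y']), ('m', ['M', 'M'])]
    (by decide) (by intro p hp; fin_cases hp <;> simp)
    (by intro p hp; fin_cases hp <;> simp) l
    (by intro p hp hh; fin_cases hp <;> simp at hh)
  have e4 := pvRep_scanP 'H' ['H', 'H', '2', '4']
    [('Y', ['Y', 'Y', 'Y', 'Y']), ('m', ['M', 'M']), ('d', ['D', 'D'])]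
    (by decide) (by intro p hp; fin_cases hp <;> simp)
    (by intro p hp; fin_cases hp <;> simp) l
    (by intro p hp hh; fin_cases hp <;> simp at hh)
  have e5 := pvRep_scanP 'M' ['M', 'I']
    [('Y', ['Y', 'Y', 'Y', 'Y']), ('m', ['M', 'M']), ('d', ['D', 'D']),
     ('H', ['H', 'H', '2', '4'])]
    (by decide) (by intro p hp; fin_cases hp <;> simp)
    (by intro p hp; fin_cases hp <;> simp) l
    (by intro p hp hh
        fin_cases hp <;> simp at hh
        exact h)
  have e6 := pvRep_scanP 'S' ['S', 'S']
    [('Y', ['Y', 'Y', 'Y', 'Y']), ('m', ['M', 'M']), ('d', ['D', 'D']),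
     ('H', ['H', 'H', '2', '4']), ('M', ['M', 'I'])]
    (by decide) (by intro p hp; fin_cases hp <;> simp)
    (by intro p hp; fin_cases hp <;> simp) l
    (by intro p hp hh; fin_cases hp <;> simp at hh)
  rw [pvScanP_nil l] at e1
  simp only [List.cons_append, List.nil_append] at e1 e2 e3 e4 e5 e6
  rw [pvScan_eq_scanP l, pvTable]
  rw [e1, e2, e3, e4, e5, e6]

-- ===== VERDICT (by name: the statement is the Claim_ definition above) =====
theorem psql_date_format_spec : Claim_unchanged_psql_date_format := by
  intro s _ hD
  have hinf : ¬ ('%' :: '%' :: ['m']) <:+: s.toList := by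
    intro hx
    apply hD
    unfold D_psql_date_format
    exact (PySem.Str.isIn_iff_infix _ _).mpr (by simpa using hx)
  apply String.toList_inj.mp
  have hA : psql_date_format s =
      PySem.Str.replace (PySem.Str.replace (PySem.Str.replace (PySem.Str.replace (PySem.Str.replace
        (PySem.Str.replace s "%Y" "YYYY") "%m" "MM") "%d" "DD") "%H" "HH24") "%M" "MI") "%S" "SS" :=
    rfl
  rw [hA, psql_date_format_alt]
  have t1 : "%Y".toList = ['%', 'Y'] := rfl
  have t2 : "%m".toList = ['%', 'm'] := rfl
  have t3 : "%d".toList = ['%', 'd'] := rfl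
  have t4 : "%H".toList = ['%', 'H'] := rfl
  have t5 : "%M".toList = ['%', 'M'] := rfl
  have t6 : "%S".toList = ['%', 'S'] := rfl
  have v1 : "YYYY".toList = ['Y', 'Y', 'Y', 'Y'] := rfl
  have v2 : "MM".toList = ['M', 'M'] := rfl
  have v3 : "DD".toList = ['D', 'D'] := rfl
  have v4 : "HH24".toList = ['H', 'H', '2', '4'] := rfl
  have v5 : "MI".toList = ['M', 'I'] := rfl
  have v6 : "SS".toList = ['S', 'S'] := rfl
  simp only [PySem.Str.toList_replace, String.toList_ofList, t1, t2, t3, t4, t5, t6,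
    v1, v2, v3, v4, v5, v6, pvRep_eq_replace]
  exact pvChain_eq_scan s.toList hinf

theorem psql_date_format_changed : Claim_changed_psql_date_format := by
  unfold Claim_changed_psql_date_format; decide

-- ===== tightness: A and B really differ on every input containing "%%m" =====

def pvPs4 : List (Char × List Char) :=
  [('Y', ['Y', 'Y', 'Y', 'Y']), ('m', ['M', 'M']), ('d', ['D', 'D']), ('H', ['H', 'H', '2', '4'])]

theorem pvScanP_single (ps : List (Char × List Char)) (a : Char) : pvScanP ps [a] = [a] := rfl

theorem pvScanP_cons_ne (ps : List (Char × List Char)) (a b : Char) (t : List Char)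
    (ha : a ≠ '%') : pvScanP ps (a :: b :: t) = a :: pvScanP ps (b :: t) := by
  simp [pvScanP, ha]

theorem pvScanP_some (ps : List (Char × List Char)) (b : Char) (t v : List Char)
    (h : List.lookup b ps = some v) : pvScanP ps ('%' :: b :: t) = v ++ pvScanP ps t := by
  simp [pvScanP, h]

theorem pvScanP_none2 (ps : List (Char × List Char)) (b : Char) (t : List Char)
    (h : List.lookup b ps = none) : pvScanP ps ('%' :: b :: t) = '%' :: pvScanP ps (b :: t) := by
  simp [pvScanP, h]

theorem pvRep_hit (c : Char) (v : List Char) (b : Char) (t : List Char) (hb : b = c) :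
    pvRep c v ('%' :: b :: t) = v ++ pvRep c v t := by
  simp [pvRep, hb]

theorem pvRep_miss (c : Char) (v : List Char) (b : Char) (t : List Char) (hb : b ≠ c) :
    pvRep c v ('%' :: b :: t) = '%' :: pvRep c v (b :: t) := by
  simp [pvRep, hb]

theorem pvInf1 (a : Char) (t : List Char) (ha : a ≠ '%') (h : ['%', '%', 'm'] <:+: (a :: t)) :
    ['%', '%', 'm'] <:+: t := by
  rcases List.infix_cons_iff.mp h with hp | hi
  · obtain ⟨r, hr⟩ := hp; simp at hr; exact absurd hr.1.symm ha
  · exact hi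

theorem pvInf0 (b : Char) (t : List Char) (hb : b ≠ '%') (h : ['%', '%', 'm'] <:+: ('%' :: b :: t)) :
    ['%', '%', 'm'] <:+: (b :: t) := by
  rcases List.infix_cons_iff.mp h with hp | hi
  · obtain ⟨r, hr⟩ := hp; simp at hr; exact absurd hr.1.symm hb
  · exact hi

theorem pvInf2 (b : Char) (t : List Char) (hb : b ≠ '%') (h : ['%', '%', 'm'] <:+: ('%' :: b :: t)) :
    ['%', '%', 'm'] <:+: t := by
  rcases List.infix_cons_iff.mp h with hp | hi
  · obtain ⟨r, hr⟩ := hp; simp at hr; exact absurd hr.1.symm hb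
  · exact pvInf1 b t hb hi

theorem pvInf3 (c0 : Char) (t0 : List Char) (hc : c0 ≠ 'm')
    (h : ['%', '%', 'm'] <:+: ('%' :: '%' :: c0 :: t0)) :
    ['%', '%', 'm'] <:+: ('%' :: c0 :: t0) := by
  rcases List.infix_cons_iff.mp h with hp | hi
  · obtain ⟨r, hr⟩ := hp; simp at hr; exact absurd hr.1.symm hc
  · exact hi

theorem pvHeadA (c0 : Char) (t0 : List Char) (hc0 : c0 ≠ 'm') :
    ∀ hh tt, pvScanP pvPs4 ('%' :: c0 :: t0) = hh :: tt → hh ≠ 'M' ∧ hh ≠ 'S' := by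
  intro hh tt heq
  cases hbk : List.lookup c0 pvPs4 with
  | some w =>
    have hmem := pvLookup_mem c0 w pvPs4 hbk
    rw [pvScanP_some pvPs4 c0 t0 w hbk] at heq
    fin_cases hmem
    · simp only [List.cons_append] at heq
      injection heq with h1 _; subst h1; exact ⟨by decide, by decide⟩
    · exact absurd rfl hc0
    · simp only [List.cons_append] at heq
      injection heq with h1 _; subst h1; exact ⟨by decide, by decide⟩
    · simp only [List.cons_append] at heq
      injection heq with h1 _; subst h1; exact ⟨by decide, by decide⟩
  | none =>
    rw [pvScanP_none2 pvPs4 c0 t0 hbk] at heq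
    injection heq with h1 _; subst h1; exact ⟨by decide, by decide⟩

theorem pvHeadB (X : List Char) (hX : ∀ h' t', X = h' :: t' → h' ≠ 'S') :
    ∀ hh tt, pvRep 'M' ['M', 'I'] X = hh :: tt → hh ≠ 'S' := by
  intro hh tt heq
  match X, hX with
  | [], _ => simp [pvRep] at heq
  | [x], hX =>
    simp only [pvRep] at heq
    injection heq with h1 _
    exact h1 ▸ hX x [] rfl
  | x :: y :: xs, hX =>
    by_cases hm : x = '%' ∧ y = 'M'
    · simp only [pvRep, if_pos hm, List.cons_append] at heq
      injection heq with h1 _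
      subst h1
      decide
    · simp only [pvRep, if_neg hm] at heq
      injection heq with h1 _
      exact h1 ▸ hX x (y :: xs) rfl

theorem pvTight : ∀ l, ['%', '%', 'm'] <:+: l →
    pvRep 'S' ['S', 'S'] (pvRep 'M' ['M', 'I'] (pvScanP pvPs4 l)) ≠ pvScanP pvTable l
  | [], h => by have := h.length_le; simp at this
  | [a], h => by have := h.length_le; simp at this
  | a :: b :: t, h => by
    have htbl : pvTable = pvPs4 ++ [('M', ['M', 'I']), ('S', ['S', 'S'])] := rfl
    by_cases ha : a = '%'
    · subst ha
      cases hbk : List.lookup b pvPs4 with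
      | some w =>
        have hmem := pvLookup_mem b w pvPs4 hbk
        have hb : b ≠ '%' := by fin_cases hmem <;> simp
        have hw : ∀ ch ∈ w, ch ≠ '%' := by fin_cases hmem <;> simp
        have hlk6 : List.lookup b pvTable = some w := by
          rw [htbl, List.lookup_append, hbk]; rfl
        have hrec := pvTight t (pvInf2 b t hb h)
        intro heq
        apply hrec
        rw [pvScanP_some pvPs4 b t w hbk, pvScanP_some pvTable b t w hlk6,
          pvRep_append 'M' ['M', 'I'] w _ hw, pvRep_append 'S' ['S', 'S'] w _ hw] at heq
        exact List.append_cancel_left heq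
      | none =>
        by_cases hbM : b = 'M'
        · subst hbM
          cases t with
          | nil => have := h.length_le; simp at this
          | cons b2 t2 =>
            have hrec := pvTight (b2 :: t2) (pvInf2 'M' _ (by decide) h)
            intro heq
            apply hrec
            rw [pvScanP_none2 pvPs4 'M' _ hbk, pvScanP_cons_ne pvPs4 'M' b2 t2 (by decide),
              pvScanP_some pvTable 'M' (b2 :: t2) ['M', 'I'] rfl,
              pvRep_hit 'M' ['M', 'I'] 'M' _ rfl] at heq
            simp only [List.cons_append, List.nil_append] at heq
            rw [pvRep_cons 'S' ['S', 'S'] 'M' _ (by decide),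
              pvRep_cons 'S' ['S', 'S'] 'I' _ (by decide)] at heq
            simpa using heq
        · by_cases hbS : b = 'S'
          · subst hbS
            cases t with
            | nil => have := h.length_le; simp at this
            | cons b2 t2 =>
              have hrec := pvTight (b2 :: t2) (pvInf2 'S' _ (by decide) h)
              intro heq
              apply hrec
              rw [pvScanP_none2 pvPs4 'S' _ hbk, pvScanP_cons_ne pvPs4 'S' b2 t2 (by decide),
                pvScanP_some pvTable 'S' (b2 :: t2) ['S', 'S'] rfl,
                pvRep_miss 'M' ['M', 'I'] 'S' _ (by decide),
                pvRep_cons 'M' ['M', 'I'] 'S' _ (by decide),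
                pvRep_hit 'S' ['S', 'S'] 'S' _ rfl] at heq
              simp only [List.cons_append, List.nil_append] at heq
              simpa using heq
          · by_cases hb : b = '%'
            · subst hb
              cases t with
              | nil => have := h.length_le; simp at this
              | cons c0 t0 =>
                by_cases hc0 : c0 = 'm'
                · subst hc0
                  intro heq
                  rw [pvScanP_none2 pvPs4 '%' _ hbk,
                    pvScanP_some pvPs4 'm' t0 ['M', 'M'] rfl,
                    pvScanP_none2 pvTable '%' _ rfl,
                    pvScanP_some pvTable 'm' t0 ['M', 'M'] rfl] at heq
                  simp only [List.cons_append, List.nil_append] at heq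
                  rw [pvRep_hit 'M' ['M', 'I'] 'M' _ rfl,
                    pvRep_cons 'M' ['M', 'I'] 'M' _ (by decide)] at heq
                  simp only [List.cons_append, List.nil_append] at heq
                  rw [pvRep_cons 'S' ['S', 'S'] 'M' _ (by decide)] at heq
                  simp at heq
                · have hrec := pvTight ('%' :: c0 :: t0) (pvInf3 c0 t0 hc0 h)
                  intro heq
                  apply hrec
                  rw [pvScanP_none2 pvPs4 '%' _ hbk, pvScanP_none2 pvTable '%' _ rfl,
                    pvRep_pct 'M' ['M', 'I'] _
                      (fun hh tt e => (pvHeadA c0 t0 hc0 hh tt e).1),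
                    pvRep_pct 'S' ['S', 'S'] _
                      (pvHeadB _ (fun h' t' e => (pvHeadA c0 t0 hc0 h' t' e).2))] at heq
                  simpa using heq
            · -- b matches nothing at all
              have hrec := pvTight (b :: t) (pvInf0 b t hb h)
              intro heq
              apply hrec
              have hlk6 : List.lookup b pvTable = none := by
                rw [htbl, List.lookup_append, hbk]
                simp only [Option.none_or]
                simp only [List.lookup, beq_eq_false_iff_ne.mpr hbM,
                  beq_eq_false_iff_ne.mpr hbS]
              have hbase : ∀ h' t', pvScanP pvPs4 (b :: t) = h' :: t' → h' ≠ 'M' ∧ h' ≠ 'S' := by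
                intro h' t' e
                cases t with
                | nil =>
                  rw [pvScanP_single] at e
                  injection e with e1 _
                  exact e1 ▸ ⟨hbM, hbS⟩
                | cons b3 t3 =>
                  rw [pvScanP_cons_ne pvPs4 b b3 t3 hb] at e
                  injection e with e1 _
                  exact e1 ▸ ⟨hbM, hbS⟩
              rw [pvScanP_none2 pvPs4 b t hbk, pvScanP_none2 pvTable b t hlk6,
                pvRep_pct 'M' ['M', 'I'] _ (fun hh tt e => (hbase hh tt e).1),
                pvRep_pct 'S' ['S', 'S'] _
                  (pvHeadB _ (fun h' t' e => (hbase h' t' e).2))] at heq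
              simpa using heq
    · -- window does not start with '%'
      have hrec := pvTight (b :: t) (pvInf1 a _ ha h)
      intro heq
      apply hrec
      rw [pvScanP_cons_ne pvPs4 a b t ha, pvScanP_cons_ne pvTable a b t ha,
        pvRep_cons 'M' ['M', 'I'] a _ ha, pvRep_cons 'S' ['S', 'S'] a _ ha] at heq
      simpa using heq
termination_by l _ => l.length
decreasing_by all_goals subst_vars; simp [List.length_cons]

-- the first four passes absorb unconditionally (their values never re-form a key)
theorem pvChain4 (l : List Char) :
    pvRep 'H' ['H', 'H', '2', '4'] (pvRep 'd' ['D', 'D'] (pvRep 'm' ['M', 'M']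
      (pvRep 'Y' ['Y', 'Y', 'Y', 'Y'] l))) = pvScanP pvPs4 l := by
  have e1 := pvRep_scanP 'Y' ['Y', 'Y', 'Y', 'Y'] [] (by decide) (by simp) (by simp) l (by simp)
  have e2 := pvRep_scanP 'm' ['M', 'M'] [('Y', ['Y', 'Y', 'Y', 'Y'])]
    (by decide) (by intro p hp; fin_cases hp <;> simp)
    (by intro p hp; fin_cases hp <;> simp) l
    (by intro p hp hh; fin_cases hp <;> simp at hh)
  have e3 := pvRep_scanP 'd' ['D', 'D'] [('Y', ['Y', 'Y', 'Y', 'Y']), ('m', ['M', 'M'])]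
    (by decide) (by intro p hp; fin_cases hp <;> simp)
    (by intro p hp; fin_cases hp <;> simp) l
    (by intro p hp hh; fin_cases hp <;> simp at hh)
  have e4 := pvRep_scanP 'H' ['H', 'H', '2', '4']
    [('Y', ['Y', 'Y', 'Y', 'Y']), ('m', ['M', 'M']), ('d', ['D', 'D'])]
    (by decide) (by intro p hp; fin_cases hp <;> simp)
    (by intro p hp; fin_cases hp <;> simp) l
    (by intro p hp hh; fin_cases hp <;> simp at hh)
  rw [pvScanP_nil l] at e1
  simp only [List.cons_append, List.nil_append] at e1 e2 e3 e4
  rw [e1, e2, e3, e4]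
  rfl

theorem psql_date_format_tight : Claim_exact_psql_date_format := by
  intro s _ hD heq
  have hinf : ['%', '%', 'm'] <:+: s.toList := by
    have := (PySem.Str.isIn_iff_infix "%%m" s).mp hD
    simpa using this
  apply pvTight s.toList hinf
  have hA : psql_date_format s =
      PySem.Str.replace (PySem.Str.replace (PySem.Str.replace (PySem.Str.replace (PySem.Str.replace
        (PySem.Str.replace s "%Y" "YYYY") "%m" "MM") "%d" "DD") "%H" "HH24") "%M" "MI") "%S" "SS" :=
    rfl
  have h2 := congrArg String.toList heq
  rw [hA, psql_date_format_alt] at h2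
  have t1 : "%Y".toList = ['%', 'Y'] := rfl
  have t2 : "%m".toList = ['%', 'm'] := rfl
  have t3 : "%d".toList = ['%', 'd'] := rfl
  have t4 : "%H".toList = ['%', 'H'] := rfl
  have t5 : "%M".toList = ['%', 'M'] := rfl
  have t6 : "%S".toList = ['%', 'S'] := rfl
  have v1 : "YYYY".toList = ['Y', 'Y', 'Y', 'Y'] := rfl
  have v2 : "MM".toList = ['M', 'M'] := rfl
  have v3 : "DD".toList = ['D', 'D'] := rfl
  have v4 : "HH24".toList = ['H', 'H', '2', '4'] := rfl
  have v5 : "MI".toList = ['M', 'I'] := rfl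
  have v6 : "SS".toList = ['S', 'S'] := rfl
  simp only [PySem.Str.toList_replace, String.toList_ofList, t1, t2, t3, t4, t5, t6,
    v1, v2, v3, v4, v5, v6, pvRep_eq_replace] at h2
  rw [pvChain4 s.toList, pvScan_eq_scanP s.toList] at h2
  exact h2
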